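-- pv_equiv track=rewrite | github.com/jhnwu3/ReproAI4H | src/pubmed/pmc_scrape.py | count_mentions_grouped
-- ===== SOURCE A (Python) =====
-- def count_mentions_grouped(text, dataset_mapping):
--     if text is None:
--         return {}
--     text = text.lower()
--     counts = {key: 0 for key in dataset_mapping}
--     for key, terms in dataset_mapping.items():
--         counts[key] = sum(1 for term in terms if term in text)
--     return counts
-- ===== SOURCE B (Python) =====
-- def count_mentions_grouped(text, dataset_mapping):
--     if text is None:
--         return {}
--     lowered = text.lower()
--     hits = {t for terms in dataset_mapping.values() for t in terms if t in lowered}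
--     return {key: len([t for t in terms if t in hits])
--             for key, terms in dataset_mapping.items()}
-- ===== Notes on version B (the rewrite author's own statement) =====
-- stated objective: alternative
-- what changed: B replaces A's mutable dict built in two passes by a flat set comprehension that scans every term against the text once (so duplicate terms across groups are tested once) followed by a single dict comprehension counting by set membership.
import Mathlib
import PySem

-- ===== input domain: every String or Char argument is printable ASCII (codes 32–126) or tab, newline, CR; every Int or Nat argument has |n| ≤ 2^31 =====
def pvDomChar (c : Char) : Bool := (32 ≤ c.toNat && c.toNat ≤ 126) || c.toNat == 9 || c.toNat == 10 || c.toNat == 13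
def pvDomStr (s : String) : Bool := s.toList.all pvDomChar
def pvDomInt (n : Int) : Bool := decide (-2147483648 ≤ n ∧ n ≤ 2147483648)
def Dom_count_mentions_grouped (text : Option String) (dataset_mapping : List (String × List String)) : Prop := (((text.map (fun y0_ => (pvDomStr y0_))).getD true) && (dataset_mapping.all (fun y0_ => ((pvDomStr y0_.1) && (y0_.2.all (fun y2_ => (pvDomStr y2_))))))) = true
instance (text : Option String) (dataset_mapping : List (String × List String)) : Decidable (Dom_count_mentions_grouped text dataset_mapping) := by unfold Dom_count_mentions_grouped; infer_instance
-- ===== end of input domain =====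

-- ===== PORT A =====
-- B replaces A's mutable dict built in two passes by one flat set comprehension of matched terms plus one dict comprehension counting by set membership (alternative decomposition, no speed claim).
def count_mentions_grouped (text : Option String) (dataset_mapping : List (String × List String)) : List (String × Int) :=
  match text with
  | none => []
  | some t =>
    let tl := PySem.Str.lower t
    let counts : PySem.Dict String Int :=
      dataset_mapping.foldl (fun d p => d.insert p.1 0) PySem.Dict.empty
    let counts :=
      dataset_mapping.foldl
        (fun d p =>
          d.insert p.1 (p.2.foldl (fun a term => if PySem.Str.isIn term tl then a + 1 else a) 0))
        counts
    counts.items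

-- ===== PORT B =====
def count_mentions_grouped_alt (text : Option String) (dataset_mapping : List (String × List String)) : List (String × Int) :=
  match text with
  | none => []
  | some t =>
    let lowered := PySem.Str.lower t
    let hits : PySem.Set String :=
      PySem.Set.ofList
        ((dataset_mapping.flatMap Prod.snd).filter (fun term => PySem.Str.isIn term lowered))
    dataset_mapping.map
      (fun p => (p.1, ((p.2.filter (fun term => PySem.Set.contains hits term)).length : Int)))

-- ===== PRECONDITION & SPEC =====
-- Pre_ excludes association lists with duplicate keys: A's parameter is a Python dict, which cannot contain duplicate keys, so such lists represent no input A is ever called on.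
def Pre_count_mentions_grouped (text : Option String) (dataset_mapping : List (String × List String)) : Prop :=
  (dataset_mapping.map Prod.fst).Nodup
instance (text : Option String) (dataset_mapping : List (String × List String)) : Decidable (Pre_count_mentions_grouped text dataset_mapping) := by unfold Pre_count_mentions_grouped; infer_instance
def pvWitness_count_mentions_grouped : Option String × (List (String × List String)) :=
  (some "the mimic dataset", [("mimic", ["mimic", "MIMIC-III"]), ("eicu", ["eicu"])])
def Spec_count_mentions_grouped (text : Option String) (dataset_mapping : List (String × List String)) (out : List (String × Int)) : Prop := out = count_mentions_grouped_alt text dataset_mapping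
instance (text : Option String) (dataset_mapping : List (String × List String)) (out : List (String × Int)) : Decidable (Spec_count_mentions_grouped text dataset_mapping out) := by unfold Spec_count_mentions_grouped; infer_instance

-- ===== CLAIM (what is proved, stated in full; the proofs are below) =====
def Claim_equal_count_mentions_grouped : Prop := ∀ (text : Option String) (dataset_mapping : List (String × List String)), Dom_count_mentions_grouped text dataset_mapping → Pre_count_mentions_grouped text dataset_mapping → Spec_count_mentions_grouped text dataset_mapping (count_mentions_grouped text dataset_mapping)

-- ===== LEMMAS AND PROOFS =====

-- A's per-group counting loop counts exactly the terms whose test holds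
theorem foldl_count_eq_filter_length (c : String → Bool) (terms : List String) :
    ∀ a : Int, terms.foldl (fun a t => if c t then a + 1 else a) a
      = a + ((terms.filter c).length : Int) := by
  induction terms with
  | nil => intro a; simp
  | cons t ts ih =>
    intro a
    by_cases h : c t
    · simp only [List.foldl_cons, if_pos h, List.filter_cons_of_pos h, ih, List.length_cons]
      push_cast; ring
    · simp only [List.foldl_cons, if_neg h, List.filter_cons_of_neg h, ih]

-- the per-group counting folds agree when the per-term tests agree
theorem filter_length_congr (terms : List String) (c1 c2 : String → Bool)
    (h : ∀ t ∈ terms, c1 t = c2 t) :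
    (terms.filter c1).length = (terms.filter c2).length := by
  rw [List.filter_congr h]

-- A's second pass: overwriting every key of an already-built zero dict, position-preserving
theorem foldl_insert_overwrite (f : String × List String → Int) :
    ∀ (l : List (String × List String)) (pre : List (String × Int)),
      ((pre.map Prod.fst) ++ l.map Prod.fst).Nodup →
      (l.foldl (fun d p => d.insert p.1 (f p))
          (PySem.Dict.mk (pre ++ l.map (fun p => (p.1, (0 : Int)))))).items
        = pre ++ l.map (fun p => (p.1, f p)) := by
  intro l
  induction l with
  | nil => intro pre h; simp
  | cons p ps ih =>
    intro pre h
    simp only [List.foldl_cons]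
    have hkey : p.1 ∉ pre.map Prod.fst ∧ p.1 ∉ ps.map Prod.fst := by
      rcases List.nodup_append.mp h with ⟨h1, h2, h3⟩
      constructor
      · intro hx; exact h3 _ hx _ (by simp) rfl
      · exact (List.nodup_cons.mp h2).1
    have hstep :
        (PySem.Dict.mk (pre ++ (p.1, (0:Int)) :: ps.map (fun q => (q.1, (0:Int))))).insert p.1 (f p)
          = PySem.Dict.mk ((pre ++ [(p.1, f p)]) ++ ps.map (fun q => (q.1, (0:Int)))) := by
      apply PySem.Dict.ext
      have hcont : (PySem.Dict.mk (pre ++ (p.1, (0:Int)) :: ps.map (fun q => (q.1, (0:Int))))).contains p.1 = true := by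
        simp
      rw [PySem.Dict.items_insert_of_contains _ _ hcont]
      show List.map (fun q => if (q.1 == p.1) = true then (p.1, f p) else q)
            (pre ++ (p.1, (0:Int)) :: ps.map (fun q => (q.1, (0:Int))))
          = (pre ++ [(p.1, f p)]) ++ ps.map (fun q => (q.1, (0:Int)))
      rw [List.map_append, List.map_cons, List.map_map]
      have hpre : pre.map (fun q => if (q.1 == p.1) = true then (p.1, f p) else q) = pre := by
        conv_rhs => rw [← List.map_id pre]
        apply List.map_congr_left
        intro q hq
        have hne : q.1 ≠ p.1 := fun e => hkey.1 (e ▸ List.mem_map_of_mem hq)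
        simp [hne]
      have hps2 : ps.map ((fun q => if (q.1 == p.1) = true then (p.1, f p) else q) ∘ (fun q => (q.1, (0:Int))))
          = ps.map (fun q => (q.1, (0:Int))) := by
        apply List.map_congr_left
        intro q hq
        have hne : q.1 ≠ p.1 := fun e => hkey.2 (e ▸ List.mem_map_of_mem hq)
        simp [Function.comp, hne]
      rw [hpre, hps2]
      simp
    rw [List.map_cons] at *
    rw [hstep]
    have hnodup : (((pre ++ [(p.1, f p)]).map Prod.fst) ++ ps.map Prod.fst).Nodup := by
      simp only [List.map_append] at *
      simpa [List.append_assoc] using h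
    have := ih (pre ++ [(p.1, f p)]) hnodup
    rw [this]
    simp

-- A's first pass builds the zero dict from empty with distinct fresh keys
theorem foldl_insert_fresh_items (f : String × List String → Int)
    (l : List (String × List String)) (h : (l.map Prod.fst).Nodup) :
    (l.foldl (fun d p => d.insert p.1 (f p)) (PySem.Dict.empty : PySem.Dict String Int)).items
      = l.map (fun p => (p.1, f p)) := by
  have := PySem.Dict.items_foldl_insert_fresh (d := (PySem.Dict.empty : PySem.Dict String Int))
      (l := l) (k := fun p => p.1) (v := fun p => f p)
      (by intro a _; simp) (by simpa using h)
  simpa using this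

-- ===== VERDICT (by name: the statement is the Claim_ definition above) =====
theorem count_mentions_grouped_spec : Claim_equal_count_mentions_grouped := by
  intro text dataset_mapping _ hpre
  unfold Spec_count_mentions_grouped count_mentions_grouped count_mentions_grouped_alt
  cases text with
  | none => rfl
  | some t =>
    simp only []
    set low := PySem.Str.lower t with hlow
    have hzero :
        (dataset_mapping.foldl (fun d p => d.insert p.1 (0:Int)) (PySem.Dict.empty : PySem.Dict String Int))
          = PySem.Dict.mk ([] ++ dataset_mapping.map (fun p => (p.1, (0:Int)))) := by
      apply PySem.Dict.ext
      rw [foldl_insert_fresh_items (fun _ => (0:Int)) dataset_mapping hpre]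
      rfl
    rw [hzero,
      foldl_insert_overwrite
        (fun p => p.2.foldl (fun a term => if PySem.Str.isIn term low then a + 1 else a) 0)
        dataset_mapping [] (by simpa using hpre)]
    simp only [List.nil_append]
    apply List.map_congr_left
    intro p hp
    have hhit : ∀ term ∈ p.2,
        PySem.Str.isIn term low
          = PySem.Set.contains
              (PySem.Set.ofList
                ((dataset_mapping.flatMap Prod.snd).filter (fun term => PySem.Str.isIn term low)))
              term := by
      intro term ht
      have hmem : term ∈ (PySem.Set.ofList
            ((dataset_mapping.flatMap Prod.snd).filter (fun term => PySem.Str.isIn term low)))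
          ↔ PySem.Str.isIn term low = true := by
        rw [PySem.Set.mem_ofList, List.mem_filter]
        constructor
        · exact fun h => h.2
        · intro h
          exact ⟨List.mem_flatMap.mpr ⟨p, hp, ht⟩, h⟩
      by_cases hT : PySem.Str.isIn term low = true
      · rw [hT]; exact ((PySem.Set.contains_iff _ _).mpr (hmem.mpr hT)).symm
      · have hF : PySem.Str.isIn term low = false := by simpa using hT
        rw [hF]; symm; rw [Bool.eq_false_iff]
        intro hc
        exact hT (hmem.mp ((PySem.Set.contains_iff _ _).mp hc))
    have := foldl_count_eq_filter_length (fun term => PySem.Str.isIn term low) p.2 0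
    rw [this, filter_length_congr p.2 _ _ hhit]
    simp only [zero_add]
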